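-- pv_equiv track=rewrite | github.com/jsnunez/bases_python | verificar.py | calculardigito
-- ===== SOURCE A (Python) =====
-- def calculardigito(rev,tamaño) :
--     suma=0
--     for i in range (2,tamaño+2) :
--         if i<=7 :
--             suma=suma+(int(rev[i-2])*i)
--         elif i>7:
--             suma=suma+(int(rev[i-2])*i-6)
--     return suma
-- ===== SOURCE B (Python) =====
-- def calculardigito(rev, tamaño):
--     # Recursive decomposition: process the digits back-to-front.
--     # go(k) = checksum contribution of the first k digits (digit k-1 carries
--     # weight k+1, and weights above 7 get a flat 6 subtracted).
--     def go(k):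
--         if k <= 0:
--             return 0
--         w = k + 1
--         penalty = 6 if w > 7 else 0
--         return go(k - 1) + int(rev[k - 1]) * w - penalty
--     return go(tamaño)
-- ===== Notes on version B (the rewrite author's own statement) =====
-- stated objective: alternative
-- what changed: Replaces A's forward iterative loop over range(2, tamaño+2) with a branching accumulator by a recursive back-to-front decomposition go(k) = go(k-1) + weighted term, with the over-7 penalty computed as a value rather than a control-flow branch.
import Mathlib
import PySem

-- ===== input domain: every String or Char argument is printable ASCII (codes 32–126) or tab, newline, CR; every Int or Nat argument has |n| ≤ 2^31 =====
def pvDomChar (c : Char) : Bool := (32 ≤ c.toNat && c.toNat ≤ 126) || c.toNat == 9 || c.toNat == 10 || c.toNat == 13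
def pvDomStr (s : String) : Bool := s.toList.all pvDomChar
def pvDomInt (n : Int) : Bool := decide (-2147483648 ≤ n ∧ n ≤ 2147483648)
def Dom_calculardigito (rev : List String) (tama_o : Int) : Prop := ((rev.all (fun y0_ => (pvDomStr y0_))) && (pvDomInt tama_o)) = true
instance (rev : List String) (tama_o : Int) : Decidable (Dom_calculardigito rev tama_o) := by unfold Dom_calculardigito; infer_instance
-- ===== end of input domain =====

-- B replaces A's forward iterative branching loop by a recursive back-to-front
-- decomposition with the penalty as a value; same cost (objective: alternative).

-- ===== PORT A =====
-- int(rev[i-2]) under Pre_ always succeeds; outside Pre_ Python raises, the port uses getD 0.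
def calculardigito (rev : List String) (tama_o : Int) : Int :=
  (PySem.List.pyRange 2 (tama_o + 2) 1).foldl
    (fun suma i =>
      if i ≤ 7 then
        suma + ((PySem.List.pyGet? rev (i - 2)).bind PySem.Int.ofStr?).getD 0 * i
      else if i > 7 then
        suma + (((PySem.List.pyGet? rev (i - 2)).bind PySem.Int.ofStr?).getD 0 * i - 6)
      else suma) 0

-- ===== PORT B =====
-- recursive helper go of Source B; int(rev[k-1]) ported as getD 0 (Pre_ guarantees success)
def calculardigitoGo (rev : List String) (k : Int) : Int :=
  if k ≤ 0 then 0
  else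
    calculardigitoGo rev (k - 1)
      + ((PySem.List.pyGet? rev (k - 1)).bind PySem.Int.ofStr?).getD 0 * (k + 1)
      - (if k + 1 > 7 then 6 else 0)
termination_by k.toNat
decreasing_by simp_wf; omega

def calculardigito_alt (rev : List String) (tama_o : Int) : Int :=
  calculardigitoGo rev tama_o

-- ===== PRECONDITION & SPEC =====
-- Pre_: exactly where Python A returns: every accessed index is in range
-- (tama_o ≤ len rev) and each accessed string parses as an int (no ValueError).
def Pre_calculardigito (rev : List String) (tama_o : Int) : Prop :=
  tama_o ≤ rev.length ∧
    (rev.take tama_o.toNat).all (fun s => (PySem.Int.ofStr? s).isSome) = true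
instance (rev : List String) (tama_o : Int) : Decidable (Pre_calculardigito rev tama_o) := by
  unfold Pre_calculardigito; infer_instance
def pvWitness_calculardigito : List String × Int := (["12", "3", " 7 "], 3)

def Spec_calculardigito (rev : List String) (tama_o : Int) (out : Int) : Prop := out = calculardigito_alt rev tama_o
instance (rev : List String) (tama_o : Int) (out : Int) : Decidable (Spec_calculardigito rev tama_o out) := by unfold Spec_calculardigito; infer_instance

-- ===== CLAIM (what is proved, stated in full; the proofs are below) =====
def Claim_equal_calculardigito : Prop := ∀ (rev : List String) (tama_o : Int), Dom_calculardigito rev tama_o → Pre_calculardigito rev tama_o → Spec_calculardigito rev tama_o (calculardigito rev tama_o)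

-- ===== LEMMAS AND PROOFS =====

theorem calculardigito_key (rev : List String) (t : Nat) :
    (PySem.List.pyRange 2 ((t : Int) + 2) 1).foldl
      (fun suma i =>
        if i ≤ 7 then
          suma + ((PySem.List.pyGet? rev (i - 2)).bind PySem.Int.ofStr?).getD 0 * i
        else if i > 7 then
          suma + (((PySem.List.pyGet? rev (i - 2)).bind PySem.Int.ofStr?).getD 0 * i - 6)
        else suma) 0
    = calculardigitoGo rev (t : Int) := by
  induction t with
  | zero => simp [PySem.List.pyRange, calculardigitoGo]
  | succ t ih =>
      have hrange : PySem.List.pyRange 2 ((t : Int) + 1 + 2) 1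
          = PySem.List.pyRange 2 ((t : Int) + 2) 1 ++ [(t : Int) + 2] := by
        have := PySem.List.pyRange_one_succ_right (a := 2) (b := (t : Int) + 2) (by omega)
        simpa [add_comm, add_left_comm, add_assoc] using this
      push_cast
      rw [hrange, List.foldl_append, ih]
      conv_rhs => rw [calculardigitoGo]
      rw [if_neg (by omega : ¬ ((t : Int) + 1 ≤ 0))]
      have h1 : (t : Int) + 1 - 1 = (t : Int) + 2 - 2 := by ring
      have h2 : (t : Int) + 1 + 1 = (t : Int) + 2 := by ring
      rw [h1, h2]
      simp only [List.foldl_cons, List.foldl_nil]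
      by_cases h7 : (t : Int) + 2 ≤ 7
      · rw [if_pos h7, if_neg (by omega)]; ring_nf
      · rw [if_neg h7, if_pos (by omega), if_pos (by omega)]; ring_nf

-- ===== VERDICT (by name: the statement is the Claim_ definition above) =====
theorem calculardigito_spec : Claim_equal_calculardigito := by
  intro rev tama_o _hdom _hpre
  unfold Spec_calculardigito calculardigito calculardigito_alt
  by_cases hneg : tama_o ≤ 0
  · have h1 : PySem.List.pyRange 2 (tama_o + 2) 1 = [] := by
      rw [PySem.List.pyRange_one]
      have h0 : (tama_o + 2 - 2).toNat = 0 := by omega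
      rw [h0]; simp
    rw [h1, calculardigitoGo, if_pos hneg]
    simp
  · have ht : tama_o = ((tama_o.toNat : Nat) : Int) := by omega
    rw [ht]
    exact calculardigito_key rev tama_o.toNat
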